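-- pv_equiv track=rewrite | github.com/mh70cz/mypy | challenges/pybites/bite_179.py | _detect_strings
-- ===== SOURCE A (Python) =====
-- def _detect_strings(txt):
--     q_idx  = []
--     idx = 0
--     while idx < len(txt):
--         try:
--             idx = txt.index("'", idx)
--         except ValueError:
--             break
--         if (idx > 0) and (txt[idx-1] == "\\"):
--             idx += 1
--             continue
--         q_idx.append(idx)
--         idx += 1
--
--     q_idx_len = len(q_idx)
--     #assert q_idx_len % 2 == 0 # does not work with " ' "
--
--     return list(zip(q_idx[::2],q_idx[1::2]))
-- ===== SOURCE B (Python) =====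
-- def _detect_strings(txt):
--     pending = None
--     pairs = []
--     for i, c in enumerate(txt):
--         if c == "'" and (i == 0 or txt[i - 1] != "\\"):
--             if pending is None:
--                 pending = i
--             else:
--                 pairs.append((pending, i))
--                 pending = None
--     return pairs
-- ===== Notes on version B (the rewrite author's own statement) =====
-- stated objective: simpler
-- what changed: A's index()-jumping while loop that collects all quote positions and then pairs them via [::2]/[1::2] slices and zip is replaced by a single pass over enumerate(txt) with one pending-open-quote variable that emits a pair as soon as the closing quote is seen (an unmatched trailing quote is naturally left unemitted, matching zip's truncation).
import Mathlib
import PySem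

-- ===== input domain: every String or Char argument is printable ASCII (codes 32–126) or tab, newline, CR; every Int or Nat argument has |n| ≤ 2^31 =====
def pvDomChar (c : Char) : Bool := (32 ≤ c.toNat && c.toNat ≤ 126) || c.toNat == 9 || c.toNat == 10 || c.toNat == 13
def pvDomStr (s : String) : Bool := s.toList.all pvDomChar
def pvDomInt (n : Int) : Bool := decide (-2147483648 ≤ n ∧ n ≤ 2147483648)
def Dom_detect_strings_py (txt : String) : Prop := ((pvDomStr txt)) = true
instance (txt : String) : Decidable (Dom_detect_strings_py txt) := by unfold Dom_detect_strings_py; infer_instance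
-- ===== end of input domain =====

-- B replaces A's index-jumping while loop plus even/odd slice zip by one pass over
-- enumerate(txt) with a single pending-open-quote state (objective: simpler).

-- ===== PORT A =====
-- termination fact for A's while loop: a found quote index is ≥ the search start and < the length
theorem pvFindFacts (txt : String) (idx : Nat) (h : (idx : Int) < PySem.Str.len txt)
    (hj : PySem.Str.findFrom txt "'" (idx : Int) none ≠ -1) :
    idx ≤ (PySem.Str.findFrom txt "'" (idx : Int) none).toNat ∧
      (PySem.Str.findFrom txt "'" (idx : Int) none).toNat < txt.toList.length := by
  simp only [PySem.Str.findFrom_eq, PySem.Str.len_eq,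
    show "'".toList = ['\''] from rfl] at hj h ⊢
  have hk : idx ≤ txt.toList.length := by omega
  obtain ⟨h1, h2, _⟩ := PySem.Chars.findFrom_natCast_spec txt.toList ['\''] idx hk hj
  rcases List.cons_prefix_iff.mp h2 with ⟨t, ht, -⟩
  have hlen : (PySem.Chars.findFrom txt.toList ['\''] (↑idx) none).toNat < txt.toList.length := by
    have hlt := congrArg List.length ht
    rw [List.length_drop, List.length_cons] at hlt
    omega
  exact ⟨by omega, hlen⟩

def detectALoop (txt : String) (idx : Nat) (q : List Int) : List Int :=
  if h : (idx : Int) < PySem.Str.len txt then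
    let j := PySem.Str.findFrom txt "'" (idx : Int) none
    if hj : j = -1 then q
    else
      if 0 < j ∧ PySem.Str.pyGet? txt (j - 1) = some '\\' then
        detectALoop txt (j.toNat + 1) q
      else
        detectALoop txt (j.toNat + 1) (q ++ [j])
  else q
termination_by txt.toList.length - idx
decreasing_by
  · have := pvFindFacts txt idx h hj; omega
  · have := pvFindFacts txt idx h hj; omega

def detect_strings_py (txt : String) : List (Int × Int) :=
  let q_idx := detectALoop txt 0 []
  List.zip ((PySem.List.slice? q_idx none none 2).getD [])
           ((PySem.List.slice? q_idx (some 1) none 2).getD [])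

-- ===== PORT B =====
-- the body of B's for-loop (the state is (pending, pairs))
def stepB (txt : String) (st : Option Int × List (Int × Int)) (p : Int × Char) :
    Option Int × List (Int × Int) :=
  if p.2 = '\'' ∧ (p.1 = 0 ∨ PySem.Str.pyGet? txt (p.1 - 1) ≠ some '\\') then
    match st.1 with
    | none => (some p.1, st.2)
    | some o => (none, st.2 ++ [(o, p.1)])
  else st

def detect_strings_py_alt (txt : String) : List (Int × Int) :=
  ((PySem.List.enumerate txt.toList 0).foldl (stepB txt) (none, [])).2

-- ===== PRECONDITION & SPEC =====
def Spec_detect_strings_py (txt : String) (out : List (Int × Int)) : Prop := out = detect_strings_py_alt txt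
instance (txt : String) (out : List (Int × Int)) : Decidable (Spec_detect_strings_py txt out) := by unfold Spec_detect_strings_py; infer_instance

-- ===== CLAIM (what is proved, stated in full; the proofs are below) =====
def Claim_equal_detect_strings_py : Prop := ∀ (txt : String), Dom_detect_strings_py txt → Spec_detect_strings_py txt (detect_strings_py txt)

-- ===== LEMMAS AND PROOFS =====

-- j is an unescaped single quote position of l
def unesc (l : List Char) (j : Nat) : Bool :=
  (l[j]? == some '\'') && (j == 0 || !(l[j - 1]? == some '\\'))

-- the unescaped quote positions ≥ s, ascending, as Ints
def uq (l : List Char) (s : Nat) : List Int :=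
  ((List.range' s (l.length - s)).filter (unesc l)).map (fun k : Nat => (k : Int))

-- every other element starting at the head (q[::2])
def evens {α : Type} : List α → List α
  | [] => []
  | [a] => [a]
  | a :: _ :: r => a :: evens r

-- B's pending/pairs machine run over a list of quote positions
def pairMach : Option Int × List (Int × Int) → List Int → List (Int × Int)
  | st, [] => st.2
  | (none, acc), j :: r => pairMach (some j, acc) r
  | (some o, acc), j :: r => pairMach (none, acc ++ [(o, j)]) r

theorem uq_len (l : List Char) : uq l l.length = [] := by
  simp [uq]

theorem uq_empty (l : List Char) (s : Nat)
    (hno : ∀ x, s ≤ x → l[x]? ≠ some '\'') : uq l s = [] := by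
  have hf : (List.range' s (l.length - s)).filter (unesc l) = [] := by
    rw [List.filter_eq_nil_iff]
    intro x hx
    rw [List.mem_range'_1] at hx
    simp [unesc, hno x hx.1]
  rw [uq, hf, List.map_nil]

theorem uq_jump (l : List Char) (s j : Nat) (hsj : s ≤ j) (hj : j < l.length)
    (hno : ∀ x, s ≤ x → x < j → l[x]? ≠ some '\'') :
    uq l s = (if unesc l j then [(j : Int)] else []) ++ uq l (j + 1) := by
  have hsplit : List.range' s (l.length - s) =
      List.range' s (j - s) ++ j :: List.range' (j + 1) (l.length - (j + 1)) := by
    have h1 : List.range' s ((j - s) + ((l.length - j - 1) + 1)) =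
        List.range' s (j - s) ++ List.range' (s + 1 * (j - s)) ((l.length - j - 1) + 1) :=
      (List.range'_append).symm
    have h2 : s + 1 * (j - s) = j := by omega
    have h3 : (j - s) + ((l.length - j - 1) + 1) = l.length - s := by omega
    rw [h2, h3] at h1
    rw [h1, List.range'_succ]
    congr 2
  have hfilt1 : (List.range' s (j - s)).filter (unesc l) = [] := by
    rw [List.filter_eq_nil_iff]
    intro x hx
    rw [List.mem_range'_1] at hx
    simp [unesc, hno x hx.1 (by omega)]
  rw [uq, hsplit, List.filter_append, hfilt1, List.nil_append, List.filter_cons]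
  by_cases hu : unesc l j = true
  · rw [if_pos hu, if_pos hu]
    simp [uq]
  · rw [if_neg hu, if_neg hu]
    simp [uq]

theorem no_quote_of_not_infix (l : List Char) (s : Nat)
    (h : ¬ ['\''] <:+: l.drop s) : ∀ x, s ≤ x → l[x]? ≠ some '\'' := by
  intro x hx hget
  apply h
  rw [List.singleton_infix_iff]
  have : (l.drop s)[x - s]? = some '\'' := by
    rw [List.getElem?_drop]
    rwa [show s + (x - s) = x by omega]
  exact List.mem_of_getElem? this

theorem quote_at_of_prefix (l : List Char) (m : Nat)
    (h : ['\''] <+: l.drop m) : l[m]? = some '\'' := by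
  rcases List.cons_prefix_iff.mp h with ⟨t, ht, -⟩
  have h2 : (List.drop m l).head? = l[m]? := List.head?_drop
  rw [ht] at h2
  simpa using h2.symm

-- A's while loop accumulates exactly the unescaped quote positions ≥ idx
theorem loopA_eq (txt : String) : ∀ (fuel idx : Nat) (q : List Int),
    txt.toList.length - idx ≤ fuel → idx ≤ txt.toList.length →
    detectALoop txt idx q = q ++ uq txt.toList idx := by
  intro fuel
  induction fuel with
  | zero =>
    intro idx q hf hle
    have hidx : idx = txt.toList.length := by omega
    rw [detectALoop]
    rw [dif_neg (by rw [PySem.Str.len_eq]; omega)]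
    rw [hidx, uq_len, List.append_nil]
  | succ fuel ih =>
    intro idx q hf hle
    rw [detectALoop]
    by_cases h : (idx : Int) < PySem.Str.len txt
    · rw [dif_pos h]
      have hlen' : idx ≤ txt.toList.length := by rw [PySem.Str.len_eq] at h; omega
      by_cases hj : PySem.Str.findFrom txt "'" (idx : Int) none = -1
      · have hno : ¬ ['\''] <:+: txt.toList.drop idx := by
          have hj' := hj
          rw [PySem.Str.findFrom_eq] at hj'
          have := (PySem.Chars.findFrom_natCast_eq_neg_one_iff txt.toList "'".toList idx
            hlen').mp hj'
          simpa only [show "'".toList = ['\''] from rfl] using this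
        rw [uq_empty txt.toList idx (no_quote_of_not_infix _ _ hno), List.append_nil]
        rw [PySem.Str.findFrom_eq, show "'".toList = ['\''] from rfl] at hj
        simp [hj]
      · obtain ⟨hj1, hj2⟩ := pvFindFacts txt idx h hj
        have hjC : PySem.Chars.findFrom txt.toList "'".toList (idx : Int) none ≠ -1 := by
          rw [PySem.Str.findFrom_eq] at hj; exact hj
        obtain ⟨hge, hpre, hmin⟩ :=
          PySem.Chars.findFrom_natCast_spec txt.toList "'".toList idx hlen' hjC
        rw [← PySem.Str.findFrom_eq] at hge hpre hmin
        generalize hm : (PySem.Str.findFrom txt "'" (idx : Int) none).toNat = m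
          at hpre hmin hj1 hj2
        have hjeq : PySem.Str.findFrom txt "'" (idx : Int) none = ((m : Nat) : Int) := by
          omega
        have hquote : txt.toList[m]? = some '\'' := quote_at_of_prefix _ _ hpre
        have hnoq : ∀ x, idx ≤ x → x < m → txt.toList[x]? ≠ some '\'' := by
          intro x hx1 hx2 hgx
          refine hmin x hx1 hx2 ?_
          have hxl : x < txt.toList.length := (List.getElem?_eq_some_iff.mp hgx).1
          have hd := List.drop_eq_getElem_cons (i := x) (l := txt.toList) hxl
          have hx : txt.toList[x] = '\'' := (List.getElem?_eq_some_iff.mp hgx).2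
          rw [hd, hx]
          exact List.cons_prefix_iff.mpr ⟨_, rfl, List.nil_prefix⟩
        have hsplit := uq_jump txt.toList idx m hj1 hj2 hnoq
        simp only [hjeq]
        rw [dif_neg (by omega)]
        have htn : ((m : Int)).toNat = m := by omega
        by_cases hesc : 0 < m ∧ txt.toList[m - 1]? = some '\\'
        · rw [if_pos ?hc]
          case hc =>
            refine ⟨by exact_mod_cast hesc.1, ?_⟩
            rw [PySem.Str.pyGet?_eq, PySem.Chars.pyGet?,
              show (m : Int) - 1 = (((m - 1 : Nat)) : Int) by omega,
              PySem.List.pyGet?_natCast]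
            exact hesc.2
          have hun : unesc txt.toList m = false := by
            simp [unesc, hquote, hesc.2]
            omega
          rw [htn, ih (m + 1) q (by omega) (by omega), hsplit, hun]
          simp
        · rw [if_neg ?hc]
          case hc =>
            rintro ⟨hc1, hc2⟩
            apply hesc
            refine ⟨by exact_mod_cast hc1, ?_⟩
            rw [PySem.Str.pyGet?_eq, PySem.Chars.pyGet?,
              show (m : Int) - 1 = (((m - 1 : Nat)) : Int) by omega,
              PySem.List.pyGet?_natCast] at hc2
            exact hc2
          have hun : unesc txt.toList m = true := by
            rcases not_and_or.mp hesc with he | he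
            · have hz : m = 0 := by omega
              rw [hz] at hquote ⊢
              simp [unesc, hquote]
            · by_cases hz : m = 0
              · rw [hz] at hquote ⊢
                simp [unesc, hquote]
              · simp [unesc, hquote, he]
          rw [htn, ih (m + 1) (q ++ [(m : Int)]) (by omega) (by omega), hsplit, hun]
          simp
    · rw [dif_neg h]
      have hidx : idx = txt.toList.length := by rw [PySem.Str.len_eq] at h; omega
      rw [hidx, uq_len, List.append_nil]

-- B's fold over the enumerated suffix is the pending/pairs machine on the quote positions
theorem foldB_eq (txt : String) : ∀ (fuel s : Nat) (st : Option Int × List (Int × Int)),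
    txt.toList.length - s ≤ fuel → s ≤ txt.toList.length →
    ((PySem.List.enumerate (txt.toList.drop s) (s : Int)).foldl (stepB txt) st).2 =
      pairMach st (uq txt.toList s) := by
  intro fuel
  induction fuel with
  | zero =>
    intro s st hf hle
    have hs : s = txt.toList.length := by omega
    rw [hs, List.drop_length, uq_len]
    simp [PySem.List.enumerate, pairMach]
  | succ fuel ih =>
    intro s st hf hle
    by_cases hs : s < txt.toList.length
    · rw [List.drop_eq_getElem_cons hs, PySem.List.enumerate_cons, List.foldl_cons]
      have hqs : txt.toList[s]? = some txt.toList[s] := List.getElem?_eq_getElem hs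
      have hprev : s ≠ 0 → PySem.List.pyGet? txt.toList ((s : Int) - 1) = txt.toList[s - 1]? := by
        intro hz
        rw [show (s : Int) - 1 = (((s - 1 : Nat)) : Int) by omega, PySem.List.pyGet?_natCast]
      have hcond : ((txt.toList[s] = '\'' ∧
          ((s : Int) = 0 ∨ PySem.Str.pyGet? txt ((s : Int) - 1) ≠ some '\\'))) ↔
          unesc txt.toList s = true := by
        by_cases hz : s = 0
        · subst hz
          simp [unesc, hqs]
        · rw [unesc]
          simp [hqs, hprev hz, hz]
      have hjump := uq_jump txt.toList s s (le_refl s) hs (by intro x h1 h2; omega)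
      by_cases hu : unesc txt.toList s = true
      · have hstep : stepB txt st ((s : Int), txt.toList[s]) =
            (match st.1 with
             | none => (some (s : Int), st.2)
             | some o => (none, st.2 ++ [(o, (s : Int))])) := by
          rw [stepB, if_pos (hcond.mpr hu)]
        rw [hstep, hjump, hu, if_pos rfl]
        have hrec : (s : Int) + 1 = ((s + 1 : Nat) : Int) := by push_cast; ring
        obtain ⟨p, acc⟩ := st
        cases p with
        | none =>
          rw [hrec, ih (s + 1) (some (s : Int), acc) (by omega) (by omega)]
          simp [pairMach]
        | some o =>
          rw [hrec, ih (s + 1) (none, acc ++ [(o, (s : Int))]) (by omega) (by omega)]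
          simp [pairMach]
      · have hstep : stepB txt st ((s : Int), txt.toList[s]) = st := by
          rw [stepB, if_neg]
          intro hc
          exact hu (hcond.mp hc)
        have hrec : (s : Int) + 1 = ((s + 1 : Nat) : Int) := by push_cast; ring
        rw [hstep, hjump, if_neg hu, List.nil_append, hrec,
          ih (s + 1) st (by omega) (by omega)]
    · have hs' : s = txt.toList.length := by omega
      rw [hs', List.drop_length, uq_len]
      simp [PySem.List.enumerate, pairMach]

-- q[::2] is evens q
theorem filterMap_evens {α : Type} : ∀ (xs : List α),
    (List.range ((xs.length + 1) / 2)).filterMap (fun k => xs[2 * k]?) = evens xs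
  | [] => by simp [evens]
  | [a] => by simp [evens, List.range_succ]
  | a :: b :: r => by
    have hcount : ((a :: b :: r).length + 1) / 2 = (r.length + 1) / 2 + 1 := by
      simp only [List.length_cons]; omega
    rw [hcount, List.range_succ_eq_map, List.filterMap_cons, List.filterMap_map]
    have hz : (a :: b :: r)[2 * 0]? = some a := by simp
    rw [hz]
    have hfn : ((fun k : Nat => (a :: b :: r)[2 * k]?) ∘ Nat.succ) = fun k : Nat => r[2 * k]? := by
      funext k
      simp only [Function.comp_apply]
      rw [show 2 * Nat.succ k = 2 * k + 1 + 1 by omega]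
      simp
    rw [hfn, filterMap_evens r]
    simp [evens]

theorem slice?_step2 {α : Type} (xs : List α) :
    PySem.List.slice? xs none none 2 = some (evens xs) := by
  rw [PySem.List.slice?, PySem.List.sliceIndices]
  norm_num
  by_cases h : 0 < xs.length
  · rw [if_pos (by exact_mod_cast h)]
    congr 1
    rw [show (((xs.length : Int) + 2 - 1) / 2).toNat = (xs.length + 1) / 2 by omega]
    rw [show (fun k : Nat => xs[((2 : Int) * (k : Int)).toNat]?) = fun k : Nat => xs[2 * k]? from by
      funext k; congr 1]
    exact filterMap_evens xs
  · rw [if_neg (by exact_mod_cast h)]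
    have hx : xs = [] := by cases xs <;> simp_all
    subst hx
    simp [evens]

theorem slice?_step2_from1 {α : Type} (xs : List α) :
    PySem.List.slice? xs (some 1) none 2 = some (evens xs.tail) := by
  rw [PySem.List.slice?, PySem.List.sliceIndices]
  norm_num
  cases xs with
  | nil => simp [evens]
  | cons a t =>
    cases t with
    | nil => simp [evens]
    | cons b r =>
      rw [show min (1 : Int) (((a :: b :: r).length : Int)) = 1 by
        simp only [List.length_cons]; push_cast; omega]
      rw [show ((((a :: b :: r).length : Int) - 1 + 2 - 1) / 2).toNat =
          ((b :: r).length + 1) / 2 by simp only [List.length_cons]; push_cast; omega]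
      rw [show (fun k : Nat => (a :: b :: r)[((1 : Int) + 2 * (k : Int)).toNat]?) =
          fun k : Nat => (b :: r)[2 * k]? from by
        funext k
        rw [show ((1 : Int) + 2 * (k : Int)).toNat = 2 * k + 1 by omega]
        simp]
      rw [List.tail_cons]
      exact filterMap_evens (b :: r)

theorem evens_cons_tail {α : Type} (b : α) (r : List α) :
    evens (b :: r) = b :: evens r.tail := by
  cases r with
  | nil => simp [evens]
  | cons c r' => simp [evens]

-- zip of evens/odds equals the pending machine
theorem zip_evens_pairMach : ∀ (q : List Int) (acc : List (Int × Int)),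
    pairMach (none, acc) q = acc ++ List.zip (evens q) (evens q.tail)
  | [], acc => by simp [pairMach, evens]
  | [a], acc => by simp [pairMach, evens]
  | a :: b :: r, acc => by
    rw [pairMach, pairMach, zip_evens_pairMach r (acc ++ [(a, b)])]
    rw [show evens (a :: b :: r) = a :: evens r from rfl]
    rw [List.tail_cons, evens_cons_tail]
    simp [List.zip]

-- ===== VERDICT (by name: the statement is the Claim_ definition above) =====
theorem detect_strings_py_spec : Claim_equal_detect_strings_py := by
  unfold Claim_equal_detect_strings_py
  intro txt _hdom
  unfold Spec_detect_strings_py detect_strings_py detect_strings_py_alt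
  simp only []
  rw [loopA_eq txt txt.toList.length 0 [] (by omega) (by omega), List.nil_append]
  rw [slice?_step2, slice?_step2_from1]
  simp only [Option.getD_some]
  have hb := foldB_eq txt txt.toList.length 0 (none, []) (by omega) (by omega)
  rw [List.drop_zero] at hb
  rw [show ((0 : Nat) : Int) = (0 : Int) from rfl] at hb
  rw [hb, zip_evens_pairMach (uq txt.toList 0) []]
  simp
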